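-- pv_equiv track=rewrite | github.com/drsumitag/be434-Spring2025 | assignments/10_conserved/conserved.py | find_conserved
-- ===== SOURCE A (Python) =====
-- def find_conserved(sequences):
--     """Finds conserved bases in a list of sequences."""
--     if not sequences:
--         return ""
--     num_sequences = len(sequences)
--     sequence_length = len(sequences[0])
--     conserved_line = ""
--     for i in range(sequence_length):
--         base = sequences[0][i]
--         is_conserved = True
--         for j in range(1, num_sequences):
--             if i >= len(sequences[j]) or sequences[j][i] != base:
--                 is_conserved = False
--                 break
--         if is_conserved:
--             conserved_line += "|"  # Use '|' for conserved
--         else: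
--             conserved_line += "X"  # Use 'X' for non-conserved
--     return conserved_line
-- ===== SOURCE B (Python) =====
-- def find_conserved(sequences):
--     """Finds conserved bases in a list of sequences."""
--     if not sequences:
--         return ""
--     ref = sequences[0]
--     length = len(ref)
--     mask = [True] * length
--     for seq in sequences[1:]:
--         for i in range(length):
--             if i >= len(seq) or seq[i] != ref[i]:
--                 mask[i] = False
--     return "".join("|" if m else "X" for m in mask)
-- ===== Notes on version B (the rewrite author's own statement) =====
-- stated objective: alternative
-- what changed: Sequence-major pass maintaining a boolean mask over positions (updated per sequence, then rendered once) instead of position-major scanning with an early-break flag and string concatenation.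
import Mathlib
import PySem

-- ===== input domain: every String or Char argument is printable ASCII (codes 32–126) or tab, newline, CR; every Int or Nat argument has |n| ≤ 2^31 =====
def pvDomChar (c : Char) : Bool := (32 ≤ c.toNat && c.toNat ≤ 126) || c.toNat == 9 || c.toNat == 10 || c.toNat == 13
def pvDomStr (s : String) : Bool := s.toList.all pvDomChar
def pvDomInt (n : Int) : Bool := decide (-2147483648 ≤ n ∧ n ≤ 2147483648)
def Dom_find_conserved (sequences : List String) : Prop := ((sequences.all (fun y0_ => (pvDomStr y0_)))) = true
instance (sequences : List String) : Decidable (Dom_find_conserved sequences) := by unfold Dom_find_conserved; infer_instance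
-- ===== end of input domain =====

-- B replaces A's position-major scan with an early-break flag by a sequence-major pass over a
-- boolean mask rendered once at the end (objective: alternative decomposition, not faster).
-- ===== PORT A =====
-- inner loop over j=1..num with break: structural recursion over the tail sequences
def pvCheckA (base : Char) (i : Nat) (rest : List (List Char)) : Bool :=
  match rest with
  | [] => true
  | s :: t =>
    if i ≥ s.length ∨ s.getD i ' ' ≠ base then false  -- break: is_conserved = False
    else pvCheckA base i t

def find_conserved (sequences : List String) : String :=
  match sequences with
  | [] => ""
  | s0 :: rest =>
    let cs0 := s0.toList
    let crest := rest.map String.toList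
    -- for i in range(sequence_length): append '|' or 'X'
    String.mk ((List.range cs0.length).foldl
      (fun acc i =>
        let base := cs0.getD i ' '
        let is_conserved := pvCheckA base i crest
        acc ++ [if is_conserved then '|' else 'X']) [])

-- ===== PORT B =====
def find_conserved_alt (sequences : List String) : String :=
  match sequences with
  | [] => ""
  | s0 :: rest =>
    let ref := s0.toList
    let length := ref.length
    let mask := rest.foldl
      (fun (m : List Bool) (seq : String) =>
        let cs := seq.toList
        -- for i in range(length): mask[i] = False on out-of-range or mismatch
        (List.range length).map (fun i =>
          m.getD i false && (decide (i < cs.length) && (cs.getD i ' ' == ref.getD i ' '))))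
      (List.replicate length true)
    String.mk (mask.map (fun m => if m then '|' else 'X'))

-- ===== PRECONDITION & SPEC =====
def Spec_find_conserved (sequences : List String) (out : String) : Prop := out = find_conserved_alt sequences
instance (sequences : List String) (out : String) : Decidable (Spec_find_conserved sequences out) := by unfold Spec_find_conserved; infer_instance

-- ===== CLAIM (what is proved, stated in full; the proofs are below) =====
def Claim_equal_find_conserved : Prop := ∀ (sequences : List String), Dom_find_conserved sequences → Spec_find_conserved sequences (find_conserved sequences)

-- ===== LEMMAS AND PROOFS =====

-- the position-wise "conserved" predicate both programs compute
def pvGood (ref : List Char) (rest : List String) (i : Nat) : Bool :=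
  rest.all (fun seq =>
    decide (i < seq.toList.length) && (seq.toList.getD i ' ' == ref.getD i ' '))

theorem pvGood_cons (ref : List Char) (s : String) (t : List String) (i : Nat) :
    pvGood ref (s :: t) i =
      ((decide (i < s.toList.length) && (s.toList.getD i ' ' == ref.getD i ' ')) && pvGood ref t i) := by
  rfl

theorem pvCheckA_eq_good (ref : List Char) (i : Nat) (rest : List String) :
    pvCheckA (ref.getD i ' ') i (rest.map String.toList) = pvGood ref rest i := by
  induction rest with
  | nil => rfl
  | cons s t ih =>
    simp only [List.map_cons, pvCheckA]
    rw [pvGood_cons]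
    by_cases h1 : i < s.toList.length
    · by_cases h2 : s.toList.getD i ' ' = ref.getD i ' '
      · have hc : ¬ (i ≥ s.toList.length ∨ s.toList.getD i ' ' ≠ ref.getD i ' ') := by
          rintro (h | h)
          · omega
          · exact h h2
        rw [if_neg hc, ih, decide_eq_true h1,
          show (s.toList.getD i ' ' == ref.getD i ' ') = true from beq_iff_eq.mpr h2,
          Bool.true_and, Bool.true_and]
      · rw [if_pos (Or.inr h2),
          show (s.toList.getD i ' ' == ref.getD i ' ') = false from beq_eq_false_iff_ne.mpr h2,
          Bool.and_false, Bool.false_and]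
    · rw [if_pos (Or.inl (Nat.le_of_not_lt h1)), decide_eq_false h1,
        Bool.false_and, Bool.false_and]

theorem pvGetD_map_range {α : Type} (g : Nat → α) (L i : Nat) (d : α)
    (h : i < L) : ((List.range L).map g).getD i d = g i := by
  rw [List.getD_eq_getElem?_getD]
  simp [List.getElem?_map, List.getElem?_range h]

theorem pvMaskFold (ref : List Char) (L : Nat) (rest : List String) :
    ∀ g : Nat → Bool,
    rest.foldl
      (fun (m : List Bool) (seq : String) =>
        (List.range L).map (fun i =>
          m.getD i false && (decide (i < seq.toList.length) && (seq.toList.getD i ' ' == ref.getD i ' '))))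
      ((List.range L).map g)
    = (List.range L).map (fun i => g i && pvGood ref rest i) := by
  induction rest with
  | nil => intro g; simp [pvGood]
  | cons s t ih =>
    intro g
    simp only [List.foldl_cons]
    have hstep : ((List.range L).map (fun i =>
        (((List.range L).map g).getD i false) && (decide (i < s.toList.length) && (s.toList.getD i ' ' == ref.getD i ' '))))
        = (List.range L).map (fun i => g i && (decide (i < s.toList.length) && (s.toList.getD i ' ' == ref.getD i ' '))) := by
      apply List.map_congr_left
      intro i hi
      rw [pvGetD_map_range g L i false (List.mem_range.mp hi)]
    rw [hstep, ih]
    apply List.map_congr_left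
    intro i hi
    simp [pvGood, Bool.and_assoc]

theorem pvPorts_eq (sequences : List String) :
    find_conserved sequences = find_conserved_alt sequences := by
  cases sequences with
  | nil => rfl
  | cons s0 rest =>
    simp only [find_conserved, find_conserved_alt]
    rw [PySem.List.foldl_append_singleton_eq_map]
    have hrep : (List.replicate s0.toList.length true)
        = (List.range s0.toList.length).map (fun _ => true) := by
      simp [List.map_const']
    rw [hrep, pvMaskFold s0.toList s0.toList.length rest (fun _ => true)]
    simp only [List.nil_append, Bool.true_and, List.map_map]
    congr 1
    apply List.map_congr_left
    intro i hi
    simp only [Function.comp]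
    rw [pvCheckA_eq_good]

-- ===== VERDICT (by name: the statement is the Claim_ definition above) =====
theorem find_conserved_spec : Claim_equal_find_conserved := by
  intro sequences _
  unfold Spec_find_conserved
  exact pvPorts_eq sequences
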